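-- pv_equiv track=rewrite | github.com/philz0918/srl-aware-sepf | srl_aware_politeness/preprocessing.py | extract_arg_heads
-- ===== SOURCE A (Python) =====
-- from typing import Dict, List, Optional, Tuple
--
-- def extract_arg_heads(words: List[str], tags: List[str]) -> List[int]:
--     pred_idx = -1
--     arg0_idx = -1
--     arg1_idx = -1
--     arg2_idx = -1
--     argm_idx = -1
--
--     for i, tag in enumerate(tags):
--         if tag == "B-V" and pred_idx == -1:
--             pred_idx = i
--         if tag.startswith("B-ARG0") and arg0_idx == -1:
--             arg0_idx = i
--         if tag.startswith("B-ARG1") and arg1_idx == -1: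
--             arg1_idx = i
--         if tag.startswith("B-ARG2") and arg2_idx == -1:
--             arg2_idx = i
--         if tag.startswith("B-ARGM") and argm_idx == -1:
--             argm_idx = i
--
--     return [pred_idx, arg0_idx, arg1_idx, arg2_idx, argm_idx]
-- ===== SOURCE B (Python) =====
-- def extract_arg_heads(words, tags):
--     def first(pred):
--         return next((i for i, t in enumerate(tags) if pred(t)), -1)
--     return [
--         first(lambda t: t == "B-V"),
--         first(lambda t: t.startswith("B-ARG0")),
--         first(lambda t: t.startswith("B-ARG1")),
--         first(lambda t: t.startswith("B-ARG2")),
--         first(lambda t: t.startswith("B-ARGM")),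
--     ]
-- ===== Notes on version B (the rewrite author's own statement) =====
-- stated objective: idiomatic
-- what changed: Replaces the single fused loop with five mutable first-hit flags by five independent first-match searches (next over a generator, default -1), one per tag pattern.
import Mathlib
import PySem

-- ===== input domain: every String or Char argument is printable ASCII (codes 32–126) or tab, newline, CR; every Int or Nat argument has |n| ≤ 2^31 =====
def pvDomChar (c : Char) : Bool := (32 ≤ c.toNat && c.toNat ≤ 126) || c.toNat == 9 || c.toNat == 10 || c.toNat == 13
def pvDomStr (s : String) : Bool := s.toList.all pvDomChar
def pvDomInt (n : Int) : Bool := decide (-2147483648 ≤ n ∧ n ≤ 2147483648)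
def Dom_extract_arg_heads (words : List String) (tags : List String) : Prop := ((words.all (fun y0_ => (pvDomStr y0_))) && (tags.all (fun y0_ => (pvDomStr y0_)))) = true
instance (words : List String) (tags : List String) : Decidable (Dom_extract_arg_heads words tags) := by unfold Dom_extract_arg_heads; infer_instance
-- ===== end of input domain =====

-- ===== PORT A =====
-- B mimics A's return value only; header: B does five independent first-match scans instead of A's fused single loop.
-- literal port of A's loop: one pass carrying the five indices, each set on its first match
def pvLoopA : List String → Nat → Int × Int × Int × Int × Int → Int × Int × Int × Int × Int
  | [], _, s => s
  | tag :: rest, i, (p, a0, a1, a2, am) =>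
    pvLoopA rest (i + 1)
      ((if tag == "B-V" && p == -1 then (i : Int) else p),
       (if PySem.Str.startswith tag "B-ARG0" && a0 == -1 then (i : Int) else a0),
       (if PySem.Str.startswith tag "B-ARG1" && a1 == -1 then (i : Int) else a1),
       (if PySem.Str.startswith tag "B-ARG2" && a2 == -1 then (i : Int) else a2),
       (if PySem.Str.startswith tag "B-ARGM" && am == -1 then (i : Int) else am))

def extract_arg_heads (words : List String) (tags : List String) : List Int :=
  let s := pvLoopA tags 0 (-1, -1, -1, -1, -1)
  [s.1, s.2.1, s.2.2.1, s.2.2.2.1, s.2.2.2.2]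

-- ===== PORT B =====
-- port of B's first(pred): first index (from i) whose tag satisfies pred, else -1
def pvFirst (pred : String → Bool) : List String → Nat → Int
  | [], _ => -1
  | t :: rest, i => if pred t then (i : Int) else pvFirst pred rest (i + 1)

def extract_arg_heads_alt (words : List String) (tags : List String) : List Int :=
  [pvFirst (fun t => t == "B-V") tags 0,
   pvFirst (fun t => PySem.Str.startswith t "B-ARG0") tags 0,
   pvFirst (fun t => PySem.Str.startswith t "B-ARG1") tags 0,
   pvFirst (fun t => PySem.Str.startswith t "B-ARG2") tags 0,
   pvFirst (fun t => PySem.Str.startswith t "B-ARGM") tags 0]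

-- ===== PRECONDITION & SPEC =====
def Spec_extract_arg_heads (words : List String) (tags : List String) (out : List Int) : Prop := out = extract_arg_heads_alt words tags
instance (words : List String) (tags : List String) (out : List Int) : Decidable (Spec_extract_arg_heads words tags out) := by unfold Spec_extract_arg_heads; infer_instance

-- ===== CLAIM (what is proved, stated in full; the proofs are below) =====
def Claim_equal_extract_arg_heads : Prop := ∀ (words : List String) (tags : List String), Dom_extract_arg_heads words tags → Spec_extract_arg_heads words tags (extract_arg_heads words tags)

-- ===== LEMMAS AND PROOFS =====

-- a component that is still -1 stays -1 (nil case of the loop)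
theorem pvIteNeg1 (x : Int) : (if (x == -1) = true then (-1 : Int) else x) = x := by
  by_cases h : x = -1 <;> simp [h]

-- one component of one fused-loop step equals the corresponding step of an independent first-match search
theorem pvStep (c : Bool) (x G : Int) (i : Nat) :
    (if ((if c && x == -1 then (i : Int) else x) == -1) = true then G
     else (if c && x == -1 then (i : Int) else x))
      = if (x == -1) = true then (if c = true then (i : Int) else G) else x := by
  have hi : ¬((i : Int) = -1) := by omega
  by_cases hc : c = true <;> by_cases hx : x = -1 <;> simp [hc, hx, hi]

-- the fused loop computes, in each component, the first match from i when the component is still -1, else keeps it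
theorem pvLoopA_eq (tags : List String) (i : Nat) (s : Int × Int × Int × Int × Int) :
    pvLoopA tags i s =
      ((if (s.1 == -1) = true then pvFirst (fun t => t == "B-V") tags i else s.1),
       (if (s.2.1 == -1) = true then pvFirst (fun t => PySem.Str.startswith t "B-ARG0") tags i else s.2.1),
       (if (s.2.2.1 == -1) = true then pvFirst (fun t => PySem.Str.startswith t "B-ARG1") tags i else s.2.2.1),
       (if (s.2.2.2.1 == -1) = true then pvFirst (fun t => PySem.Str.startswith t "B-ARG2") tags i else s.2.2.2.1),
       (if (s.2.2.2.2 == -1) = true then pvFirst (fun t => PySem.Str.startswith t "B-ARGM") tags i else s.2.2.2.2)) := by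
  induction tags generalizing i s with
  | nil =>
    obtain ⟨p, a0, a1, a2, am⟩ := s
    simp only [pvLoopA, pvFirst, pvIteNeg1]
  | cons tag rest ih =>
    obtain ⟨p, a0, a1, a2, am⟩ := s
    simp only [pvLoopA, ih, pvFirst, pvStep]

-- ===== VERDICT (by name: the statement is the Claim_ definition above) =====
theorem extract_arg_heads_spec : Claim_equal_extract_arg_heads := by
  intro words tags _
  unfold Spec_extract_arg_heads extract_arg_heads extract_arg_heads_alt
  simp [pvLoopA_eq]
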